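-- pv_equiv track=rewrite | github.com/AlexCorb95/Courses | alex_python_basics/Curs_14_02/rama_functie.py | listat_de_rama
-- ===== SOURCE A (Python) =====
-- def listat_de_rama(i):
--     prov = i
--     lista = []
--     for i in range(prov, -1, -1):
--         lista.append(f'{"*" * i}{" " * (20 + (prov - i) * 2)}{"*" * i}')
--
--     lista.append(f"{' ' * ((20 + prov * 2) // 2 - 2)}{'.' * 4}{' ' * ((20 + prov * 2) // 2 - 2)}")
--
--     for i in range(0, prov + 1, 1):
--         lista.append(f'{"*" * i}{" " * (20 + (prov - i) * 2)}{"*" * i}')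
--     return lista
-- ===== SOURCE B (Python) =====
-- def listat_de_rama(i):
--     # single row-indexed pass: row r of the 2*m+1 rows has abs(r-m)-1 stars,
--     # where m = max(i+1, 0) is the index of the dotted middle row
--     m = max(i + 1, 0)
--     pad = ' ' * ((20 + i * 2) // 2 - 2)
--     out = []
--     for r in range(2 * m + 1):
--         if r == m:
--             out.append(pad + '.' * 4 + pad)
--         else:
--             s = abs(r - m) - 1
--             out.append('*' * s + ' ' * (20 + (i - s) * 2) + '*' * s)
--     return out
-- ===== Notes on version B (the rewrite author's own statement) =====
-- stated objective: alternative
-- what changed: B makes one row-indexed pass over all 2*m+1 output rows, computing each row's star count by the closed form abs(r-m)-1 around the middle index m=max(i+1,0), instead of A's two separate counting loops (descending then ascending) around an appended middle line.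
import Mathlib
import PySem

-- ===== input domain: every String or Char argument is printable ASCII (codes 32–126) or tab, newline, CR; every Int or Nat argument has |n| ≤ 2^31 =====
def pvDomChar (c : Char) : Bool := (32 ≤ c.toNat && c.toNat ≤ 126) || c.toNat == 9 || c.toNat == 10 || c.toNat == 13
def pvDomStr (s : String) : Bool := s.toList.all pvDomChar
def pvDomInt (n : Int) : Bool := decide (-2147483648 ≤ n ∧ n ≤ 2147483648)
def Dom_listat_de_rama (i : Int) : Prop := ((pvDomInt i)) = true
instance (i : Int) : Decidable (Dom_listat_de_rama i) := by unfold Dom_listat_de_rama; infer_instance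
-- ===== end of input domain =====

-- B is a single row-indexed pass with a closed-form star count |r-m|-1 per row, instead of A's
-- two counting loops around an appended middle line; same values, a different decomposition.

-- Python "c" * n (empty for n ≤ 0)
def pvRep (c : Char) (n : Int) : String := String.ofList (List.replicate n.toNat c)

-- ===== PORT A =====
-- the f-string of A's two loops
def pvLineA (prov j : Int) : String :=
  pvRep '*' j ++ pvRep ' ' (20 + (prov - j) * 2) ++ pvRep '*' j

def listat_de_rama (i : Int) : List String :=
  let prov := i
  let lista : List String := []
  let lista := (PySem.List.pyRange prov (-1) (-1)).foldl (fun acc j => acc ++ [pvLineA prov j]) lista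
  let lista := lista ++ [pvRep ' ' (PySem.Int.floordiv (20 + prov * 2) 2 - 2) ++ pvRep '.' 4 ++
                         pvRep ' ' (PySem.Int.floordiv (20 + prov * 2) 2 - 2)]
  let lista := (PySem.List.pyRange 0 (prov + 1) 1).foldl (fun acc j => acc ++ [pvLineA prov j]) lista
  lista

-- ===== PORT B =====
-- the star-row f-string of B's else branch
def pvLineB (i s : Int) : String :=
  pvRep '*' s ++ pvRep ' ' (20 + (i - s) * 2) ++ pvRep '*' s

def listat_de_rama_alt (i : Int) : List String :=
  let m := max (i + 1) 0
  let pad := pvRep ' ' (PySem.Int.floordiv (20 + i * 2) 2 - 2)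
  (PySem.List.pyRange 0 (2 * m + 1) 1).foldl
    (fun out r =>
      out ++ [if r = m then pad ++ pvRep '.' 4 ++ pad else pvLineB i (|r - m| - 1)]) []

-- ===== PRECONDITION & SPEC =====
def Spec_listat_de_rama (i : Int) (out : List String) : Prop := out = listat_de_rama_alt i
instance (i : Int) (out : List String) : Decidable (Spec_listat_de_rama i out) := by
  unfold Spec_listat_de_rama; infer_instance

-- ===== CLAIM =====
def Claim_equal_listat_de_rama : Prop :=
  ∀ (i : Int), Dom_listat_de_rama i → Spec_listat_de_rama i (listat_de_rama i)

-- ===== LEMMAS AND PROOFS =====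

-- ===== VERDICT =====
theorem listat_de_rama_spec : Claim_equal_listat_de_rama := by
  intro i _
  show listat_de_rama i = listat_de_rama_alt i
  simp only [listat_de_rama, listat_de_rama_alt, PySem.List.foldl_append_singleton_eq_map,
    List.nil_append, PySem.List.pyRange_neg_one_eq_reverse]
  by_cases hneg : i + 1 ≤ 0
  · -- i < 0: both sides are just the middle line
    have hm : max (i + 1) 0 = 0 := by omega
    rw [hm, show (-1 : Int) + 1 = 0 by norm_num,
        PySem.List.pyRange_one_eq_nil hneg,
        show (2 : Int) * 0 + 1 = 0 + 1 by norm_num,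
        PySem.List.pyRange_one_singleton 0]
    simp
  · -- i ≥ 0: split B's range at m = i + 1 and at m + 1
    have hm : max (i + 1) 0 = i + 1 := by omega
    rw [hm, show (-1 : Int) + 1 = 0 by norm_num,
        PySem.List.pyRange_one_append 0 (i + 1) (2 * (i + 1) + 1) (by omega) (by omega),
        PySem.List.pyRange_one_append (i + 1) (i + 1 + 1) (2 * (i + 1) + 1) (by omega) (by omega),
        PySem.List.pyRange_one_singleton (i + 1)]
    simp only [List.map_append, List.map_cons, List.map_nil, if_true, List.append_assoc]
    congr 1
    · -- descending half, proved element by element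
      apply List.ext_getElem
      · simp [PySem.List.length_pyRange_one]
      · intro k h1 h2
        simp only [List.getElem_map, List.getElem_reverse,
          PySem.List.length_pyRange_one, PySem.List.getElem_pyRange_one, zero_add]
        have hk : k < ((i : Int) + 1 - 0).toNat := by
          simpa [PySem.List.length_pyRange_one] using h2
        have hif : ((k : Int) ≠ i + 1) := by omega
        rw [if_neg hif]
        have harg : |(k : Int) - (i + 1)| - 1 = ((((i : Int) + 1 - 0).toNat - 1 - k : Nat) : Int) := by
          rw [abs_of_nonpos (by omega)]; omega
        rw [harg]
        rfl
    congr 1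
    -- ascending half, proved element by element
    apply List.ext_getElem
    · simp [PySem.List.length_pyRange_one]; omega
    · intro k h1 h2
      have hk : k < ((i : Int) + 1).toNat := by
        simpa [PySem.List.length_pyRange_one] using h1
      simp only [List.getElem_map, PySem.List.getElem_pyRange_one, zero_add]
      have hif : (i : Int) + 1 + 1 + (k : Int) ≠ i + 1 := by omega
      rw [if_neg hif]
      have harg : |(i : Int) + 1 + 1 + (k : Int) - (i + 1)| - 1 = (k : Int) := by
        rw [abs_of_nonneg (by omega)]; omega
      rw [harg]
      rfl
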